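-- pv_equiv track=rewrite | github.com/KarolinaPSouza/dataset-pesquisa | 1667-Message_Route/12196679.py | kadanes_algo_neg
-- ===== SOURCE A (Python) =====
-- def kadanes_algo_neg(arr):
--     sm = 0
--     mn = float("inf")
--     ans = []
--     for num in arr:
--         sm += num
--         if sm > 0:
--             sm = 0
--         mn = min(mn, sm)
--         ans.append(mn)
--     return ans
-- ===== SOURCE B (Python) =====
-- def kadanes_algo_neg(arr):
--     # prefix sums of arr
--     prefix = []
--     s = 0
--     for x in arr:
--         s += x
--         prefix.append(s)
--     # running maximum of prefix sums, floored at 0 (the empty prefix)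
--     peak = []
--     m = 0
--     for p in prefix:
--         m = max(m, p)
--         peak.append(m)
--     # prefix[i] - peak[i] is the minimum (possibly empty) subarray sum ending
--     # at i; the answer is its running minimum.
--     out = []
--     best = 0
--     for p, m in zip(prefix, peak):
--         best = min(best, p - m)
--         out.append(best)
--     return out
-- ===== Notes on version B (the rewrite author's own statement) =====
-- stated objective: alternative
-- what changed: Replaces Kadane's reset-capped running-sum recurrence (sm = 0 if sm+num > 0, with an inf-seeded running min) by the prefix-sum formulation: compute plain prefix sums, the running maximum of prefix sums floored at 0, their pointwise difference, and finally its running minimum.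
import Mathlib
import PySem

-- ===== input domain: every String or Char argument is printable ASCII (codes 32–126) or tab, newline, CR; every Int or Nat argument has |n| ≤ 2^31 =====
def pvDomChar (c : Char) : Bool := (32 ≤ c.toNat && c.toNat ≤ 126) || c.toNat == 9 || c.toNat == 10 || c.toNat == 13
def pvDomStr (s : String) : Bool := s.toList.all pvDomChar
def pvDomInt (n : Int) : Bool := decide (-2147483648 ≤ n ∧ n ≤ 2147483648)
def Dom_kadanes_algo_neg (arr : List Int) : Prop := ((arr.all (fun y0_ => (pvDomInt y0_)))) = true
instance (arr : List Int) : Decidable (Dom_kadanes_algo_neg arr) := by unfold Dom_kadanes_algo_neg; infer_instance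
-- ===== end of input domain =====

-- B replaces Kadane's reset-capped recurrence by prefix sums minus the running max of prefix sums
-- (floored at 0), followed by a running minimum (objective: alternative algorithm, same cost).

-- ===== PORT A =====
-- mn = float('inf') is rendered as Option Int: none = inf, min inf x = x.
def kadanes_algo_neg (arr : List Int) : List Int :=
  (arr.foldl
    (fun (st : Int × Option Int × List Int) num =>
      let sm := st.1 + num
      let sm := if sm > 0 then 0 else sm
      let mn := match st.2.1 with
        | none => sm
        | some m => min m sm
      (sm, some mn, st.2.2 ++ [mn]))
    (0, none, [])).2.2

-- ===== PORT B =====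
-- each of Source B's three loops is the same scan shape: carry acc, append the new acc
def pvScan (f : Int → Int → Int) (a : Int) : List Int → List Int
  | [] => []
  | x :: xs => let a' := f a x; a' :: pvScan f a' xs

def kadanes_algo_neg_alt (arr : List Int) : List Int :=
  let pref := pvScan (· + ·) 0 arr
  let pk := pvScan max 0 pref
  pvScan min 0 ((pref.zip pk).map (fun pm => pm.1 - pm.2))

-- ===== PRECONDITION & SPEC =====
def Spec_kadanes_algo_neg (arr : List Int) (out : List Int) : Prop := out = kadanes_algo_neg_alt arr
instance (arr : List Int) (out : List Int) : Decidable (Spec_kadanes_algo_neg arr out) := by unfold Spec_kadanes_algo_neg; infer_instance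

-- ===== CLAIM (what is proved, stated in full; the proofs are below) =====
def Claim_equal_kadanes_algo_neg : Prop := ∀ (arr : List Int), Dom_kadanes_algo_neg arr → Spec_kadanes_algo_neg arr (kadanes_algo_neg arr)

-- ===== LEMMAS AND PROOFS =====

-- the reset-capped sum sequence of A (sm values)
def pvCappedRec (sm : Int) : List Int → List Int
  | [] => []
  | n :: ns => let a := if sm + n > 0 then 0 else sm + n; a :: pvCappedRec a ns

-- running minimum with an Option carry (none = inf)
def pvRunMin : Option Int → List Int → List Int
  | _, [] => []
  | none, x :: xs => x :: pvRunMin (some x) xs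
  | some m, x :: xs => let m' := min m x; m' :: pvRunMin (some m') xs

-- fused recurrence equal to B's zip of the two scans
def pvDRec (p m : Int) : List Int → List Int
  | [] => []
  | n :: ns => let p' := p + n; let m' := max m p'; (p' - m') :: pvDRec p' m' ns

theorem pvAfold_eq (arr : List Int) (sm : Int) (mn : Option Int) (ans : List Int) :
    (arr.foldl
      (fun (st : Int × Option Int × List Int) num =>
        let sm := st.1 + num
        let sm := if sm > 0 then 0 else sm
        let mn := match st.2.1 with
          | none => sm
          | some m => min m sm
        (sm, some mn, st.2.2 ++ [mn]))
      (sm, mn, ans)).2.2 = ans ++ pvRunMin mn (pvCappedRec sm arr) := by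
  induction arr generalizing sm mn ans with
  | nil => simp [pvRunMin, pvCappedRec]
  | cons n ns ih =>
      cases mn with
      | none =>
          simp only [List.foldl_cons, ih, pvCappedRec, pvRunMin, List.append_assoc,
            List.singleton_append]
      | some m =>
          simp only [List.foldl_cons, ih, pvCappedRec, pvRunMin, List.append_assoc,
            List.singleton_append]

theorem pvZip_eq (ns : List Int) (p m : Int) :
    ((pvScan (· + ·) p ns).zip (pvScan max m (pvScan (· + ·) p ns))).map
      (fun pm => pm.1 - pm.2) = pvDRec p m ns := by
  induction ns generalizing p m with
  | nil => simp [pvScan, pvDRec]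
  | cons n ns ih => simp [pvScan, pvDRec, ih]

theorem pvDRec_eq_capped (ns : List Int) (p m : Int) (hm : 0 ≤ m) :
    pvDRec p m ns = pvCappedRec (p - m) ns := by
  induction ns generalizing p m with
  | nil => rfl
  | cons n ns ih =>
      simp only [pvDRec, pvCappedRec]
      have h1 : (p + n) - max m (p + n) = (if (p - m) + n > 0 then 0 else (p - m) + n) := by
        rcases max_cases m (p + n) with ⟨h, _⟩ | ⟨h, _⟩ <;> rw [h] <;> omega
      have h2 : pvDRec (p + n) (max m (p + n)) ns
          = pvCappedRec ((p + n) - max m (p + n)) ns := ih _ _ (le_max_of_le_left hm)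
      rw [h1] at h2 ⊢
      rw [h2]

theorem pvCapped_nonpos (s : Int) (ns : List Int) (hs : s ≤ 0) :
    ∀ x ∈ pvCappedRec s ns, x ≤ 0 := by
  induction ns generalizing s with
  | nil => simp [pvCappedRec]
  | cons n ns ih =>
      intro x hx
      simp only [pvCappedRec, List.mem_cons] at hx
      rcases hx with rfl | hx
      · split <;> omega
      · exact ih _ (by split <;> omega) x hx

theorem pvRunMin_some_eq_scan (m : Int) (xs : List Int) :
    pvRunMin (some m) xs = pvScan min m xs := by
  induction xs generalizing m with
  | nil => rfl
  | cons x xs ih => simp [pvRunMin, pvScan, ih]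

theorem pvScan_min_zero (xs : List Int) (h : ∀ x ∈ xs, x ≤ 0) :
    pvScan min 0 xs = pvRunMin none xs := by
  cases xs with
  | nil => rfl
  | cons x xs =>
      have hx : x ≤ 0 := h x (by simp)
      simp [pvScan, pvRunMin, pvRunMin_some_eq_scan, min_eq_right hx]

-- ===== VERDICT (by name: the statement is the Claim_ definition above) =====
theorem kadanes_algo_neg_spec : Claim_equal_kadanes_algo_neg := by
  intro arr _
  unfold Spec_kadanes_algo_neg kadanes_algo_neg kadanes_algo_neg_alt
  rw [pvAfold_eq]
  show _ = pvScan min 0 (((pvScan (· + ·) 0 arr).zip (pvScan max 0 (pvScan (· + ·) 0 arr))).map (fun pm => pm.1 - pm.2))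
  rw [pvZip_eq, pvDRec_eq_capped _ _ _ le_rfl]
  simp only [sub_zero, List.nil_append]
  exact (pvScan_min_zero _ (pvCapped_nonpos 0 arr le_rfl)).symm
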